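-- pv_equiv track=rewrite | github.com/Nyanyan/Egaroucid | src/tools/evaluation/util/pattern_visualizer.py | rotate_all
-- ===== SOURCE A (Python) =====
-- def yx_to_idx(y, x):
--     return y * 8 + x
--
-- def idx_to_yx(yx):
--     return yx // 8, yx % 8
--
-- def rotate_all(yx_list):
--     res = [set([]) for _ in range(8)]
--     for yx in yx_list:
--         y, x = idx_to_yx(yx)
--         res[0].add(yx_to_idx(y, x))
--         res[1].add(yx_to_idx(y, 7 - x))
--         res[2].add(yx_to_idx(7 - y, x))
--         res[3].add(yx_to_idx(7 - y, 7 - x))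
--         res[4].add(yx_to_idx(x, y))
--         res[5].add(yx_to_idx(x, 7 - y))
--         res[6].add(yx_to_idx(7 - x, y))
--         res[7].add(yx_to_idx(7 - x, 7 - y))
--     return res
-- ===== SOURCE B (Python) =====
-- def yx_to_idx(y, x):
--     return y * 8 + x
--
-- def idx_to_yx(yx):
--     return yx // 8, yx % 8
--
-- def _hflip(i):
--     return i - i % 8 + 7 - i % 8
--
-- def _vflip(i):
--     return (7 - i // 8) * 8 + i % 8
--
-- def _transpose(i):
--     return (i % 8) * 8 + i // 8
--
-- def rotate_all(yx_list):
--     # Generate the dihedral group from three flat-index maps by composition: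
--     # dedup the input once, then each further set is derived from an
--     # already-transformed set, never from the raw input again.
--     s0 = list(dict.fromkeys(yx_list))
--     s1 = [_hflip(i) for i in s0]
--     s2 = [_vflip(i) for i in s0]
--     s3 = [_vflip(i) for i in s1]
--     s4 = [_transpose(i) for i in s0]
--     s5 = [_transpose(i) for i in s2]
--     s6 = [_transpose(i) for i in s1]
--     s7 = [_transpose(i) for i in s3]
--     return [set(s) for s in (s0, s1, s2, s3, s4, s5, s6, s7)]
-- ===== Notes on version B (the rewrite author's own statement) =====
-- stated objective: alternative
-- what changed: B deduplicates the input once, then generates the 8 symmetric sets by composing three flat-index involutions (h-flip, v-flip, transpose), deriving each later set from an already-transformed list, instead of A's single pass decomposing each cell to (y,x) and applying all 8 formulas.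
import Mathlib
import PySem

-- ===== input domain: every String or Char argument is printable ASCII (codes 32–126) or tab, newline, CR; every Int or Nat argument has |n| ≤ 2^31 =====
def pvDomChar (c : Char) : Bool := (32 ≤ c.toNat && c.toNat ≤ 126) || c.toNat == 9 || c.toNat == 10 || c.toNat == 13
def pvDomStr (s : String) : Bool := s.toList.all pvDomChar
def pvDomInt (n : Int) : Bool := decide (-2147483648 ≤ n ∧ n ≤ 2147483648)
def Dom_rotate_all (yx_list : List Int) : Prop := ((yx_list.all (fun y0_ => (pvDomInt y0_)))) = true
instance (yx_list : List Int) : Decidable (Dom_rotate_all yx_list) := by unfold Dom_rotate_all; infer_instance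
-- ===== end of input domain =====

-- B generates the 8 symmetric sets by composing three flat-index maps (h-flip, v-flip,
-- transpose) on a once-deduplicated input, deriving each later set from an earlier
-- transformed list instead of A's single pass applying all 8 (y,x) formulas per cell.

-- ===== PORT A =====
def yx_to_idx (y x : Int) : Int := y * 8 + x

def idx_to_yx (yx : Int) : Int × Int := (PySem.Int.floordiv yx 8, PySem.Int.mod yx 8)

def rotate_all (yx_list : List Int) : List (List Int) :=
  let res :=
    yx_list.foldl
      (fun (r : PySem.Set Int × PySem.Set Int × PySem.Set Int × PySem.Set Int ×
                PySem.Set Int × PySem.Set Int × PySem.Set Int × PySem.Set Int) yx =>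
        let y := (idx_to_yx yx).1
        let x := (idx_to_yx yx).2
        (PySem.Set.add r.1 (yx_to_idx y x),
         PySem.Set.add r.2.1 (yx_to_idx y (7 - x)),
         PySem.Set.add r.2.2.1 (yx_to_idx (7 - y) x),
         PySem.Set.add r.2.2.2.1 (yx_to_idx (7 - y) (7 - x)),
         PySem.Set.add r.2.2.2.2.1 (yx_to_idx x y),
         PySem.Set.add r.2.2.2.2.2.1 (yx_to_idx x (7 - y)),
         PySem.Set.add r.2.2.2.2.2.2.1 (yx_to_idx (7 - x) y),
         PySem.Set.add r.2.2.2.2.2.2.2 (yx_to_idx (7 - x) (7 - y))))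
      (PySem.Set.ofList [], PySem.Set.ofList [], PySem.Set.ofList [], PySem.Set.ofList [],
       PySem.Set.ofList [], PySem.Set.ofList [], PySem.Set.ofList [], PySem.Set.ofList [])
  [res.1, res.2.1, res.2.2.1, res.2.2.2.1, res.2.2.2.2.1, res.2.2.2.2.2.1,
   res.2.2.2.2.2.2.1, res.2.2.2.2.2.2.2]

-- ===== PORT B =====
def pvHflip (i : Int) : Int := i - PySem.Int.mod i 8 + 7 - PySem.Int.mod i 8

def pvVflip (i : Int) : Int := (7 - PySem.Int.floordiv i 8) * 8 + PySem.Int.mod i 8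

def pvTranspose (i : Int) : Int := (PySem.Int.mod i 8) * 8 + PySem.Int.floordiv i 8

def rotate_all_alt (yx_list : List Int) : List (List Int) :=
  let s0 := PySem.List.dedup yx_list        -- list(dict.fromkeys(yx_list))
  let s1 := s0.map pvHflip
  let s2 := s0.map pvVflip
  let s3 := s1.map pvVflip
  let s4 := s0.map pvTranspose
  let s5 := s2.map pvTranspose
  let s6 := s1.map pvTranspose
  let s7 := s3.map pvTranspose
  [s0, s1, s2, s3, s4, s5, s6, s7].map (fun s => PySem.Set.ofList s)

-- ===== PRECONDITION & SPEC =====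
def Spec_rotate_all (yx_list : List Int) (out : List (List Int)) : Prop := out = rotate_all_alt yx_list
instance (yx_list : List Int) (out : List (List Int)) : Decidable (Spec_rotate_all yx_list out) := by unfold Spec_rotate_all; infer_instance

-- ===== CLAIM (what is proved, stated in full; the proofs are below) =====
def Claim_equal_rotate_all : Prop := ∀ (yx_list : List Int), Dom_rotate_all yx_list → Spec_rotate_all yx_list (rotate_all yx_list)

-- ===== LEMMAS AND PROOFS =====
-- A's simultaneous fold over the 8-tuple state splits into 8 independent folds.
theorem foldl_split8 (g0 g1 g2 g3 g4 g5 g6 g7 : Int → Int) :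
    ∀ (l : List Int) (a b c d e f g h : PySem.Set Int),
      l.foldl
        (fun (r : PySem.Set Int × PySem.Set Int × PySem.Set Int × PySem.Set Int ×
                  PySem.Set Int × PySem.Set Int × PySem.Set Int × PySem.Set Int) yx =>
          (PySem.Set.add r.1 (g0 yx), PySem.Set.add r.2.1 (g1 yx),
           PySem.Set.add r.2.2.1 (g2 yx), PySem.Set.add r.2.2.2.1 (g3 yx),
           PySem.Set.add r.2.2.2.2.1 (g4 yx), PySem.Set.add r.2.2.2.2.2.1 (g5 yx),
           PySem.Set.add r.2.2.2.2.2.2.1 (g6 yx), PySem.Set.add r.2.2.2.2.2.2.2 (g7 yx)))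
        (a, b, c, d, e, f, g, h)
      = (l.foldl (fun s yx => PySem.Set.add s (g0 yx)) a,
         l.foldl (fun s yx => PySem.Set.add s (g1 yx)) b,
         l.foldl (fun s yx => PySem.Set.add s (g2 yx)) c,
         l.foldl (fun s yx => PySem.Set.add s (g3 yx)) d,
         l.foldl (fun s yx => PySem.Set.add s (g4 yx)) e,
         l.foldl (fun s yx => PySem.Set.add s (g5 yx)) f,
         l.foldl (fun s yx => PySem.Set.add s (g6 yx)) g,
         l.foldl (fun s yx => PySem.Set.add s (g7 yx)) h)
  | [], _, _, _, _, _, _, _, _ => rfl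
  | yx :: l, a, b, c, d, e, f, g, h => by
      simp only [List.foldl_cons]
      exact foldl_split8 g0 g1 g2 g3 g4 g5 g6 g7 l _ _ _ _ _ _ _ _

-- each single fold-with-add is set(map g l)
theorem foldl_add_eq_ofList_map (g : Int → Int) (l : List Int) :
    l.foldl (fun s yx => PySem.Set.add s (g yx)) (PySem.Set.ofList []) = PySem.Set.ofList (l.map g) := by
  conv_rhs => rw [PySem.Set.ofList_eq_foldl, List.foldl_map]
  rfl

-- deduplicating before mapping does not change the resulting set (same first-occurrence order)
theorem ofList_map_ofList (g : Int → Int) (l : List Int) :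
    PySem.Set.ofList ((PySem.Set.ofList l).map g) = PySem.Set.ofList (l.map g) := by
  induction l using List.reverseRecOn with
  | nil => rfl
  | append_singleton l x ih =>
      rw [List.map_append, List.map_singleton, PySem.Set.ofList_append_singleton,
        PySem.Set.ofList_append_singleton]
      by_cases hx : x ∈ PySem.Set.ofList l
      · rw [PySem.Set.add_of_mem hx, ih, PySem.Set.add_of_mem]
        rw [PySem.Set.mem_ofList] at hx ⊢
        exact List.mem_map_of_mem hx
      · rw [PySem.Set.add_of_not_mem hx, List.map_append, List.map_singleton,
          PySem.Set.ofList_append_singleton, ih]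

-- floordiv / mod of 8*q + r for 0 ≤ r < 8
theorem fd8 (q r : Int) (h0 : 0 ≤ r) (h1 : r < 8) :
    PySem.Int.floordiv (q * 8 + r) 8 = q ∧ PySem.Int.mod (q * 8 + r) 8 = r := by
  have hq : PySem.Int.floordiv (q * 8 + r) 8 = q := by
    rw [PySem.Int.floordiv_eq_iff_of_pos (by norm_num)]
    omega
  refine ⟨hq, ?_⟩
  have := PySem.Int.floordiv_mul_add_mod (q * 8 + r) 8
  rw [hq] at this
  omega

theorem mod8_bounds (i : Int) : 0 ≤ PySem.Int.mod i 8 ∧ PySem.Int.mod i 8 < 8 :=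
  ⟨PySem.Int.mod_nonneg i (by norm_num), PySem.Int.mod_lt i (by norm_num)⟩

theorem hflip_rep (i : Int) :
    pvHflip i = (PySem.Int.floordiv i 8) * 8 + (7 - PySem.Int.mod i 8) := by
  have := PySem.Int.floordiv_mul_add_mod i 8
  unfold pvHflip
  omega

theorem pt0 (i : Int) : yx_to_idx (idx_to_yx i).1 (idx_to_yx i).2 = i := by
  have := PySem.Int.floordiv_mul_add_mod i 8
  unfold yx_to_idx idx_to_yx
  omega

theorem pt1 (i : Int) : pvHflip i = yx_to_idx (idx_to_yx i).1 (7 - (idx_to_yx i).2) := by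
  rw [hflip_rep]; rfl

theorem pt2 (i : Int) : pvVflip i = yx_to_idx (7 - (idx_to_yx i).1) (idx_to_yx i).2 := rfl

theorem pt3 (i : Int) :
    pvVflip (pvHflip i) = yx_to_idx (7 - (idx_to_yx i).1) (7 - (idx_to_yx i).2) := by
  have hb := mod8_bounds i
  have h2 := fd8 (PySem.Int.floordiv i 8) (7 - PySem.Int.mod i 8) (by omega) (by omega)
  unfold pvVflip yx_to_idx idx_to_yx
  rw [hflip_rep, h2.1, h2.2]

theorem pt4 (i : Int) : pvTranspose i = yx_to_idx (idx_to_yx i).2 (idx_to_yx i).1 := rfl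

theorem pt5 (i : Int) :
    pvTranspose (pvVflip i) = yx_to_idx (idx_to_yx i).2 (7 - (idx_to_yx i).1) := by
  have hb := mod8_bounds i
  have h2 := fd8 (7 - PySem.Int.floordiv i 8) (PySem.Int.mod i 8) (by omega) (by omega)
  unfold pvTranspose yx_to_idx idx_to_yx pvVflip
  rw [h2.1, h2.2]

theorem pt6 (i : Int) :
    pvTranspose (pvHflip i) = yx_to_idx (7 - (idx_to_yx i).2) (idx_to_yx i).1 := by
  have hb := mod8_bounds i
  have h2 := fd8 (PySem.Int.floordiv i 8) (7 - PySem.Int.mod i 8) (by omega) (by omega)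
  unfold pvTranspose yx_to_idx idx_to_yx
  rw [hflip_rep, h2.1, h2.2]

theorem pt7 (i : Int) :
    pvTranspose (pvVflip (pvHflip i)) = yx_to_idx (7 - (idx_to_yx i).2) (7 - (idx_to_yx i).1) := by
  have hb := mod8_bounds i
  have h2 := fd8 (PySem.Int.floordiv i 8) (7 - PySem.Int.mod i 8) (by omega) (by omega)
  have h3 := fd8 (7 - PySem.Int.floordiv i 8) (7 - PySem.Int.mod i 8) (by omega) (by omega)
  unfold pvTranspose yx_to_idx idx_to_yx pvVflip
  rw [hflip_rep, h2.1, h2.2, h3.1, h3.2]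

-- ===== VERDICT (by name: the statement is the Claim_ definition above) =====
theorem rotate_all_spec : Claim_equal_rotate_all := by
  intro yx_list _
  unfold Spec_rotate_all rotate_all rotate_all_alt
  rw [foldl_split8 (fun yx => yx_to_idx (idx_to_yx yx).1 (idx_to_yx yx).2)
        (fun yx => yx_to_idx (idx_to_yx yx).1 (7 - (idx_to_yx yx).2))
        (fun yx => yx_to_idx (7 - (idx_to_yx yx).1) (idx_to_yx yx).2)
        (fun yx => yx_to_idx (7 - (idx_to_yx yx).1) (7 - (idx_to_yx yx).2))
        (fun yx => yx_to_idx (idx_to_yx yx).2 (idx_to_yx yx).1)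
        (fun yx => yx_to_idx (idx_to_yx yx).2 (7 - (idx_to_yx yx).1))
        (fun yx => yx_to_idx (7 - (idx_to_yx yx).2) (idx_to_yx yx).1)
        (fun yx => yx_to_idx (7 - (idx_to_yx yx).2) (7 - (idx_to_yx yx).1))]
  simp only [foldl_add_eq_ofList_map, PySem.List.dedup_eq_ofList, List.map_map,
    ofList_map_ofList, PySem.Set.ofList_ofList, List.map_cons, List.map_nil,
    List.cons.injEq, and_true]
  refine ⟨?_, ?_, ?_, ?_, ?_, ?_, ?_, ?_⟩
  · exact congrArg PySem.Set.ofList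
      ((List.map_congr_left fun i _ => pt0 i).trans (List.map_id _))
  · exact congrArg PySem.Set.ofList (List.map_congr_left fun i _ => (pt1 i).symm)
  · exact congrArg PySem.Set.ofList (List.map_congr_left fun i _ => (pt2 i).symm)
  · exact congrArg PySem.Set.ofList (List.map_congr_left fun i _ => (pt3 i).symm)
  · exact congrArg PySem.Set.ofList (List.map_congr_left fun i _ => (pt4 i).symm)
  · exact congrArg PySem.Set.ofList (List.map_congr_left fun i _ => (pt5 i).symm)
  · exact congrArg PySem.Set.ofList (List.map_congr_left fun i _ => (pt6 i).symm)
  · exact congrArg PySem.Set.ofList (List.map_congr_left fun i _ => (pt7 i).symm)
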